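-- pv_equiv track=rewrite | github.com/ConnorEMcclanahan/PhillipsWall | Backend/services/utility_service.py | analyze_color_usage
-- ===== SOURCE A (Python) =====
-- from collections import Counter
-- from typing import List, Dict
--
-- def analyze_color_usage(questions: List) -> Dict:
--     colors = Counter(
--         question.get("color", "unknown")
--         for question in questions
--         if question.get("color")
--     )
--     gradient_colors = Counter(
--         question.get("gradient_color", "unknown")
--         for question in questions
--         if question.get("gradient_color")
--     )
--
--     return {
--         "color_palette": dict(colors),
--         "gradient_palette": dict(gradient_colors),
--         "most_used_colors": dict(colors.most_common(3)),
--         "most_used_gradients": dict(gradient_colors.most_common(3)),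
--     }
-- ===== SOURCE B (Python) =====
-- def analyze_color_usage(questions):
--     # Count by scanning: ordered list of distinct values, count via values.count;
--     # top-3 by repeated first-maximum selection instead of sorting.
--     def palette(key):
--         values = [q[key] for q in questions if q.get(key)]
--         seen = []
--         for v in values:
--             if v not in seen:
--                 seen.append(v)
--         return {v: values.count(v) for v in seen}
--
--     def top3(counts):
--         rest = list(counts.items())
--         top = {}
--         while rest and len(top) < 3:
--             best = rest[0]
--             for kv in rest[1:]:
--                 if kv[1] > best[1]:
--                     best = kv
--             top[best[0]] = best[1]
--             rest.remove(best)
--         return top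
--
--     colors = palette("color")
--     gradients = palette("gradient_color")
--     return {
--         "color_palette": colors,
--         "gradient_palette": gradients,
--         "most_used_colors": top3(colors),
--         "most_used_gradients": top3(gradients),
--     }
-- ===== Notes on version B (the rewrite author's own statement) =====
-- stated objective: alternative
-- what changed: Counts are built by listing distinct values in first-seen order and taking values.count(v) for each (no incrementing counter), and the top-3 is picked by repeated first-maximum selection with removal instead of Counter.most_common's sort/heap.
import Mathlib
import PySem

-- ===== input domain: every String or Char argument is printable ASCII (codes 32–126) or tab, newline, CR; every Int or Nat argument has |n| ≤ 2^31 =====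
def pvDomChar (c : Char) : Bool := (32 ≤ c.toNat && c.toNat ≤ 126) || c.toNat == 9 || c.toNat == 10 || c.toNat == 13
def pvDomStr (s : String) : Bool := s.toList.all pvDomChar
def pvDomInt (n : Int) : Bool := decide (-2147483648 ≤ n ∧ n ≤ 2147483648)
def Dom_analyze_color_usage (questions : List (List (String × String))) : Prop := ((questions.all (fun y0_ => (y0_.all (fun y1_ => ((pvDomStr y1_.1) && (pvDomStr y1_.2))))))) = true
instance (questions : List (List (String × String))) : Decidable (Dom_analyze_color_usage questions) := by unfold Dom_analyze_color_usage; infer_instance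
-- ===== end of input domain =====

-- B counts by listing the distinct values in first-seen order and taking values.count(v)
-- for each, and picks the top 3 by repeated first-maximum selection instead of A's
-- Counter increments and sort-based most_common (objective: alternative).

-- ===== PORT A =====
-- the generator 'question.get(key, "unknown") for question in questions if question.get(key)'
def pvGenA (key : String) (questions : List (List (String × String))) : List String :=
  questions.filterMap (fun question =>
    match (PySem.Dict.mk question).get? key with
    | some v => if v = "" then none else some ((PySem.Dict.mk question).getD key "unknown")
    | none => none)

-- Counter.most_common(3): sort items by count descending (stable), take 3
def pvMostCommon3 (d : PySem.Dict String Int) : List (String × Int) :=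
  (PySem.List.sorted d.items (fun kv => kv.2) true).take 3

def analyze_color_usage (questions : List (List (String × String))) : List (String × List (String × Int)) :=
  let colors := PySem.Dict.counter (pvGenA "color" questions)
  let gradient_colors := PySem.Dict.counter (pvGenA "gradient_color" questions)
  [("color_palette", colors.items),
   ("gradient_palette", gradient_colors.items),
   ("most_used_colors", pvMostCommon3 colors),
   ("most_used_gradients", pvMostCommon3 gradient_colors)]

-- ===== PORT B =====
-- '[q[key] for q in questions if q.get(key)]'
def pvValuesB (key : String) (questions : List (List (String × String))) : List String :=
  questions.filterMap (fun q =>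
    match (PySem.Dict.mk q).get? key with
    | some v => if v = "" then none else some v
    | none => none)

-- the 'seen' loop: append each value not seen before
def pvSeenB (values : List String) : List String :=
  values.foldl (fun seen v => if seen.contains v then seen else seen ++ [v]) []

-- '{v: values.count(v) for v in seen}'
def pvPaletteB (key : String) (questions : List (List (String × String))) : List (String × Int) :=
  let values := pvValuesB key questions
  (pvSeenB values).map (fun v => (v, (values.count v : Int)))

-- 'best = rest[0]; for kv in rest[1:]: if kv[1] > best[1]: best = kv'
def pvBestB (r0 : String × Int) (rtail : List (String × Int)) : String × Int :=
  rtail.foldl (fun b kv => if b.2 < kv.2 then kv else b) r0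

-- the 'while rest and len(top) < 3' selection loop (the fuel is 3 − len(top))
def pvTop3B : Nat → List (String × Int) → List (String × Int)
  | 0, _ => []
  | _ + 1, [] => []
  | n + 1, r0 :: rtail =>
    let best := pvBestB r0 rtail
    best :: pvTop3B n ((r0 :: rtail).erase best)

def analyze_color_usage_alt (questions : List (List (String × String))) : List (String × List (String × Int)) :=
  let colors := pvPaletteB "color" questions
  let gradients := pvPaletteB "gradient_color" questions
  [("color_palette", colors),
   ("gradient_palette", gradients),
   ("most_used_colors", pvTop3B 3 colors),
   ("most_used_gradients", pvTop3B 3 gradients)]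

-- ===== PRECONDITION & SPEC =====
def Spec_analyze_color_usage (questions : List (List (String × String))) (out : List (String × List (String × Int))) : Prop := out = analyze_color_usage_alt questions
instance (questions : List (List (String × String))) (out : List (String × List (String × Int))) : Decidable (Spec_analyze_color_usage questions out) := by unfold Spec_analyze_color_usage; infer_instance

-- ===== CLAIM (what is proved, stated in full; the proofs are below) =====
def Claim_equal_analyze_color_usage : Prop := ∀ (questions : List (List (String × String))), Dom_analyze_color_usage questions → Spec_analyze_color_usage questions (analyze_color_usage questions)

-- ===== LEMMAS AND PROOFS =====

-- the two filtered value lists coincide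
lemma genA_eq_valuesB (key : String) (questions : List (List (String × String))) :
    pvGenA key questions = pvValuesB key questions := by
  unfold pvGenA pvValuesB
  apply List.filterMap_congr
  intro q _
  rcases h : (PySem.Dict.mk q).get? key with _ | v
  · rfl
  · simp only [PySem.Dict.getD_of_get?_eq_some _ _ h]

-- B's palette is A's Counter rendered as items
lemma paletteB_eq_counter_items (key : String) (questions : List (List (String × String))) :
    pvPaletteB key questions = (PySem.Dict.counter (pvGenA key questions)).items := by
  rw [PySem.Dict.items_counter, genA_eq_valuesB]
  rfl

-- first-maximum scan is PySem.List.max?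
lemma max?_cons_eq_best (r0 : String × Int) (rtail : List (String × Int)) :
    PySem.List.max? (r0 :: rtail) (fun kv => kv.2) = some (pvBestB r0 rtail) := by
  unfold PySem.List.max? pvBestB
  simp only [List.foldl_cons]
  induction rtail generalizing r0 with
  | nil => rfl
  | cons x t ih =>
    simp only [List.foldl_cons]
    by_cases h : r0.2 < x.2 <;> simp [h, ih]

-- sorted computation lemmas
lemma sorted_rev_append_singleton (xs : List (String × Int)) (y : String × Int) :
    PySem.List.sorted (xs ++ [y]) (fun kv => kv.2) true =
      PySem.List.insertBy (fun a b => decide (b.2 < a.2)) y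
        (PySem.List.sorted xs (fun kv => kv.2) true) := by
  simp [PySem.List.sorted, List.foldl_append]

lemma max?_append_singleton_none (xs : List (String × Int)) (y : String × Int)
    (h : PySem.List.max? xs (fun kv => kv.2) = none) :
    PySem.List.max? (xs ++ [y]) (fun kv => kv.2) = some y := by
  unfold PySem.List.max? at h ⊢
  rw [List.foldl_append, h]
  rfl

lemma max?_append_singleton_some (xs : List (String × Int)) (y m0 : String × Int)
    (h : PySem.List.max? xs (fun kv => kv.2) = some m0) :
    PySem.List.max? (xs ++ [y]) (fun kv => kv.2) =
      if m0.2 < y.2 then some y else some m0 := by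
  unfold PySem.List.max? at h ⊢
  rw [List.foldl_append, h]
  rfl

lemma insertBy_cons (before : (String × Int) → (String × Int) → Bool)
    (x y : String × Int) (ys : List (String × Int)) :
    PySem.List.insertBy before x (y :: ys) =
      if before x y then x :: y :: ys else y :: PySem.List.insertBy before x ys := rfl

-- stable descending sort pulls out the first maximal element
lemma sorted_rev_eq_max_cons (xs : List (String × Int)) (m : String × Int)
    (hn : xs.Nodup) (h : PySem.List.max? xs (fun kv => kv.2) = some m) :
    PySem.List.sorted xs (fun kv => kv.2) true =
      m :: PySem.List.sorted (xs.erase m) (fun kv => kv.2) true := by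
  induction xs using List.reverseRecOn generalizing m with
  | nil => simp [PySem.List.max?] at h
  | append_singleton xs y ih =>
    have hny : y ∉ xs := by simp [List.nodup_append] at hn; tauto
    have hnx : xs.Nodup := (List.nodup_append.mp hn).1
    rcases h0 : PySem.List.max? xs (fun kv => kv.2) with _ | m0
    · have hx : xs = [] := (PySem.List.max?_eq_none_iff _ _).mp h0
      rw [max?_append_singleton_none xs y h0] at h
      injection h with h
      subst hx; subst h
      simp [PySem.List.sorted, PySem.List.insertBy]
    · rw [max?_append_singleton_some xs y m0 h0] at h
      have hm0 : m0 ∈ xs := PySem.List.max?_mem h0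
      by_cases hlt : m0.2 < y.2
      · rw [if_pos hlt] at h
        injection h with h; subst h
        rw [List.erase_append_right _ hny, List.erase_cons_head, List.append_nil,
          sorted_rev_append_singleton, ih m0 hnx h0, insertBy_cons]
        simp [hlt]
      · rw [if_neg hlt] at h
        injection h with h; subst h
        rw [List.erase_append_left _ hm0, sorted_rev_append_singleton, ih m0 hnx h0,
          sorted_rev_append_singleton, insertBy_cons]
        simp [hlt]

-- repeated first-maximum selection is take n of the stable descending sort
lemma top3B_eq_take_sorted (n : Nat) (xs : List (String × Int)) (hn : xs.Nodup) :
    pvTop3B n xs = (PySem.List.sorted xs (fun kv => kv.2) true).take n := by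
  induction n generalizing xs with
  | zero => simp [pvTop3B]
  | succ n ih =>
    cases xs with
    | nil => simp [pvTop3B, PySem.List.sorted]
    | cons r0 rtail =>
      have hmax := max?_cons_eq_best r0 rtail
      rw [pvTop3B, sorted_rev_eq_max_cons (r0 :: rtail) (pvBestB r0 rtail) hn hmax,
        List.take_succ_cons, ih _ (hn.erase _)]

lemma nodup_counter_items (xs : List String) :
    (PySem.Dict.counter xs).items.Nodup :=
  (PySem.Dict.nodup_keys_counter xs).of_map _

-- ===== VERDICT (by name: the statement is the Claim_ definition above) =====
theorem analyze_color_usage_spec : Claim_equal_analyze_color_usage := by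
  intro questions _
  show analyze_color_usage questions = analyze_color_usage_alt questions
  simp only [analyze_color_usage, analyze_color_usage_alt, pvMostCommon3]
  rw [paletteB_eq_counter_items, paletteB_eq_counter_items,
    top3B_eq_take_sorted 3 _ (nodup_counter_items _),
    top3B_eq_take_sorted 3 _ (nodup_counter_items _)]
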